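-- pv_equiv track=rewrite | github.com/JustAnAverageGuy/ideal-enigma | practice/apr_26/A2__Encode_and_Decode_(Hard_Version).py | encode_b25
-- ===== SOURCE A (Python) =====
-- b25 = [chr(ord('a')+i) for i in range(25)]
--
-- def encode_b25(A):
--     res = []
--     for n in A:
--         hm = []
--         while n:
--             hm.append(b25[n%25])
--             n //= 25
--         res.append("".join(hm[::-1]))
--
--     return 'z'.join(res)
-- ===== SOURCE B (Python) =====
-- b25 = [chr(ord('a')+i) for i in range(25)]
--
-- def encode_b25(A):
--     def enc(n):
--         return '' if n == 0 else enc(n // 25) + b25[n % 25]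
--     return 'z'.join(enc(n) for n in A)
-- ===== Notes on version B (the rewrite author's own statement) =====
-- stated objective: simpler
-- what changed: Replaces the per-number while-loop that pushes digits onto a list, reverses it and joins, by a recursive enc(n) = enc(n//25) + digit that emits the most-significant digit first, so no intermediate list and no reversal are needed.
import Mathlib
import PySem

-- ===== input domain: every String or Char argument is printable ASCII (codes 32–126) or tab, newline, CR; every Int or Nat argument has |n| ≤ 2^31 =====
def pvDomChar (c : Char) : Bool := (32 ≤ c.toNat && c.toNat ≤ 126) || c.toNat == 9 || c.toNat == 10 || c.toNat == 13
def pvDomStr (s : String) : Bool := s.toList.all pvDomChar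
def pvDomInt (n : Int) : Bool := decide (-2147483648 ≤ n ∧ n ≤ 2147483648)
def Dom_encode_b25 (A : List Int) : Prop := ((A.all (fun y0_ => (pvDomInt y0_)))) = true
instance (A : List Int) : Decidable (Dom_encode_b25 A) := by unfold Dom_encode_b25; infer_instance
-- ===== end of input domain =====

-- B replaces A's digit-list-then-reverse while-loop by a most-significant-first recursion (simpler: no list, no reversal).

-- ===== PORT A =====
-- b25[n % 25] as a Char (b25 = ['a'..'y'])
def pvDigitA (n : Int) : Char := Char.ofNat (97 + (PySem.Int.mod n 25).toNat)

-- termination fact for the while-loop measure, cited by name in decreasing_by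
theorem pvFloordiv25_toNat_lt (n : Int) (h : 0 < n) :
    (PySem.Int.floordiv n 25).toNat < n.toNat := by
  have hlt : PySem.Int.floordiv n 25 < n :=
    (PySem.Int.floordiv_lt_iff_lt_mul (by norm_num)).2 (by nlinarith)
  have hge : (0 : Int) ≤ PySem.Int.floordiv n 25 :=
    (PySem.Int.le_floordiv_iff_mul_le (by norm_num)).2 (by omega)
  omega

-- the 'while n:' loop; guard 0 < n (for n ≤ 0 Python either stops (n = 0) or never returns (n < 0, excluded by Pre_))
def pvLoopA (n : Int) (hm : List Char) : List Char :=
  if h : 0 < n then pvLoopA (PySem.Int.floordiv n 25) (hm ++ [pvDigitA n]) else hm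
termination_by n.toNat
decreasing_by exact pvFloordiv25_toNat_lt n h

def pvEncOneA (n : Int) : String := String.mk ((pvLoopA n []).reverse)

def encode_b25 (A : List Int) : String := PySem.Str.join "z" (A.map pvEncOneA)

-- ===== PORT B =====
-- enc(n) from Source B over List Char; exact for n ≥ 0 (Pre_); for n < 0 Source B raises RecursionError
def pvEncB (m : Nat) : List Char :=
  if m = 0 then [] else pvEncB (m / 25) ++ [Char.ofNat (97 + m % 25)]
decreasing_by exact Nat.div_lt_self (by omega) (by norm_num)

def encode_b25_alt (A : List Int) : String :=
  PySem.Str.join "z" (A.map (fun n => String.mk (pvEncB n.toNat)))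

-- ===== PRECONDITION & SPEC =====
-- Pre_ excludes lists containing a negative number: there A's while-loop never terminates (and B raises RecursionError).
def Pre_encode_b25 (A : List Int) : Prop := ∀ n ∈ A, 0 ≤ n
instance (A : List Int) : Decidable (Pre_encode_b25 A) := by unfold Pre_encode_b25; infer_instance

def pvWitness_encode_b25 : List Int := [0, 1, 30, 12345]

def Spec_encode_b25 (A : List Int) (out : String) : Prop := out = encode_b25_alt A
instance (A : List Int) (out : String) : Decidable (Spec_encode_b25 A out) := by unfold Spec_encode_b25; infer_instance

-- ===== CLAIM (what is proved, stated in full; the proofs are below) =====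
def Claim_equal_encode_b25 : Prop := ∀ (A : List Int), Dom_encode_b25 A → Pre_encode_b25 A → Spec_encode_b25 A (encode_b25 A)

-- ===== LEMMAS AND PROOFS =====

theorem pvLoopA_append (k : Nat) : ∀ n : Int, n.toNat = k → ∀ hm : List Char,
    pvLoopA n hm = hm ++ pvLoopA n [] := by
  induction k using Nat.strong_induction_on with
  | _ k ih =>
    intro n hk hm
    by_cases h : 0 < n
    · rw [pvLoopA, dif_pos h]
      conv_rhs => rw [pvLoopA, dif_pos h]
      rw [ih (PySem.Int.floordiv n 25).toNat (hk ▸ pvFloordiv25_toNat_lt n h) _ rfl (hm ++ [pvDigitA n]),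
        ih (PySem.Int.floordiv n 25).toNat (hk ▸ pvFloordiv25_toNat_lt n h) _ rfl ([] ++ [pvDigitA n])]
      simp
    · rw [pvLoopA, dif_neg h]
      conv_rhs => rw [pvLoopA, dif_neg h]
      simp

theorem pvLoopA_eq_encB (k : Nat) : ∀ m : Nat, m = k →
    (pvLoopA (m : Int) []).reverse = pvEncB m := by
  induction k using Nat.strong_induction_on with
  | _ k ih =>
    intro m hk
    rw [pvLoopA, pvEncB]
    by_cases h : m = 0
    · simp [h]
    · have hpos : (0 : Int) < (m : Int) := by exact_mod_cast Nat.pos_of_ne_zero h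
      rw [dif_pos hpos, if_neg h,
        pvLoopA_append (PySem.Int.floordiv (m : Int) 25).toNat _ rfl]
      have hfd : PySem.Int.floordiv (m : Int) 25 = ((m / 25 : Nat) : Int) := by
        exact_mod_cast PySem.Int.floordiv_natCast m 25
      have hmd : PySem.Int.mod (m : Int) 25 = ((m % 25 : Nat) : Int) := by
        exact_mod_cast PySem.Int.mod_natCast m 25
      rw [hfd]
      simp only [List.nil_append, List.reverse_append, List.reverse_cons, List.reverse_nil,
        List.nil_append]
      rw [ih (m / 25) (by omega) (m / 25) rfl]
      simp only [pvDigitA, hmd, Int.toNat_natCast]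

theorem pvEncOneA_eq (n : Int) (hn : 0 ≤ n) : pvEncOneA n = String.mk (pvEncB n.toNat) := by
  have h : ((n.toNat : Int)) = n := Int.toNat_of_nonneg hn
  unfold pvEncOneA
  conv_lhs => rw [← h]
  rw [pvLoopA_eq_encB n.toNat n.toNat rfl]

-- ===== VERDICT (by name: the statement is the Claim_ definition above) =====
theorem encode_b25_spec : Claim_equal_encode_b25 := by
  intro A _ hpre
  unfold Spec_encode_b25 encode_b25 encode_b25_alt
  congr 1
  exact List.map_congr_left (fun n hn => pvEncOneA_eq n (hpre n hn))
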